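-- pv_equiv track=rewrite | github.com/ridgebackinfosec/mundane | mundane_pkg/tui.py | parse_severity_selection
-- ===== SOURCE A (Python) =====
-- from typing import Any, List, Optional, Tuple, Dict, Callable, TYPE_CHECKING
--
-- def parse_severity_selection(
--     selection: str, max_index: int
-- ) -> Optional[List[int]]:
--     """
--     Parse user selection into list of severity indices.
--
--     Supports:
--         - Single number: "1" -> [1]
--         - Range: "1-3" -> [1, 2, 3]
--         - Comma-separated: "1,3,5" -> [1, 3, 5]
--         - Mixed: "1-3,5,7-9" -> [1, 2, 3, 5, 7, 8, 9]
--
--     Args: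
--         selection: User input string
--         max_index: Maximum valid index (inclusive)
--
--     Returns:
--         List of valid 1-based indices, or None if invalid
--     """
--     indices = set()
--
--     # Split by comma first
--     parts = [p.strip() for p in selection.split(",")]
--
--     for part in parts:
--         if not part:
--             continue
--
--         # Check if it's a range
--         if "-" in part:
--             range_parts = part.split("-", 1)
--             if len(range_parts) != 2:
--                 return None
--
--             start_str, end_str = range_parts
--             if not start_str.isdigit() or not end_str.isdigit():
--                 return None
--
--             start = int(start_str)
--             end = int(end_str)
--
--             if start < 1 or end > max_index or start > end:
--                 return None
--
--             indices.update(range(start, end + 1))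
--         else:
--             # Single number
--             if not part.isdigit():
--                 return None
--
--             num = int(part)
--             if num < 1 or num > max_index:
--                 return None
--
--             indices.add(num)
--
--     if not indices:
--         return None
--
--     return sorted(list(indices))
-- ===== SOURCE B (Python) =====
-- def _parse_part(part):
--     """Parse one non-empty comma part into a (start, end) interval, or None if malformed."""
--     if "-" in part:
--         pieces = part.split("-", 1)
--         if pieces[0].isdigit() and pieces[1].isdigit():
--             return (int(pieces[0]), int(pieces[1]))
--         return None
--     if part.isdigit():
--         n = int(part)
--         return (n, n)
--     return None
--
--
-- def parse_severity_selection(selection, max_index):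
--     """Staged pipeline: parse every part into an interval up front, validate all at
--     once, then sort intervals by start, merge overlapping/adjacent ones and expand —
--     no per-element set, no final sorted() over elements."""
--     raw = [_parse_part(p.strip()) for p in selection.split(",") if p.strip()]
--
--     if None in raw:
--         return None
--     if any(s < 1 or e > max_index or s > e for s, e in raw):
--         return None
--     if not raw:
--         return None
--
--     raw.sort(key=lambda iv: iv[0])
--
--     merged = [raw[0]]
--     for s, e in raw[1:]:
--         ms, me = merged[-1]
--         if s <= me + 1:
--             if e > me:
--                 merged[-1] = (ms, e)
--         else:
--             merged.append((s, e))
--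
--     out = []
--     for s, e in merged:
--         out.extend(range(s, e + 1))
--     return out
-- ===== Notes on version B (the rewrite author's own statement) =====
-- stated objective: alternative
-- what changed: B replaces A's single validating loop that accumulates a set of indices plus a final sorted() by a staged pipeline: parse all parts into (start,end) intervals with a helper, validate them all at once, sort the intervals by start, merge overlapping/adjacent intervals and expand the merged intervals in order (already sorted and duplicate-free).
import Mathlib
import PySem

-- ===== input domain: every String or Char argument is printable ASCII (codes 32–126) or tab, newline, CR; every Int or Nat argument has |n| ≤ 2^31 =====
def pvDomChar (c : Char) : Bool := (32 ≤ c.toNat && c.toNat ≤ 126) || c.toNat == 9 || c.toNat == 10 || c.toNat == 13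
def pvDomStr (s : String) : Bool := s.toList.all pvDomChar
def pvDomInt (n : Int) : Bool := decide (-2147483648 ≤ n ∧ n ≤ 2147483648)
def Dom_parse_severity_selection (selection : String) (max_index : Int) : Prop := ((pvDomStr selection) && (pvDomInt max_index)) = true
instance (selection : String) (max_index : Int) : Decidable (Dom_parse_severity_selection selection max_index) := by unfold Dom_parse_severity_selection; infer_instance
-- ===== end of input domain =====

-- B replaces A's single validating loop accumulating a set (plus a final sort) by a
-- staged pipeline: parse all parts into intervals, validate them all at once, then
-- sort, merge and expand the intervals (objective: alternative algorithm).

-- ===== PORT A =====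
-- loop over the comma-separated parts, accumulating a set of indices
-- (int(s) after an isdigit check always succeeds, so `(ofStr? s).getD 0` is exact)
def psLoopA (mi : Int) : List String → PySem.Set Int → Option (PySem.Set Int)
  | [], s => some s
  | p :: rest, s =>
    if p = "" then psLoopA mi rest s
    else if PySem.Str.isIn "-" p then
      match PySem.Str.splitMax? p "-" 1 with
      | none => none
      | some rps =>
        if rps.length ≠ 2 then none
        else
          match rps with
          | [start_str, end_str] =>
            if !PySem.Str.strIsdigit start_str || !PySem.Str.strIsdigit end_str then none
            else
              let start := (PySem.Int.ofStr? start_str).getD 0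
              let endv := (PySem.Int.ofStr? end_str).getD 0
              if start < 1 ∨ endv > mi ∨ start > endv then none
              else psLoopA mi rest (PySem.Set.update s (PySem.List.pyRange start (endv + 1)))
          | _ => none
    else
      if !PySem.Str.strIsdigit p then none
      else
        let num := (PySem.Int.ofStr? p).getD 0
        if num < 1 ∨ num > mi then none
        else psLoopA mi rest (PySem.Set.add s num)

def parse_severity_selection (selection : String) (max_index : Int) : Option (List Int) :=
  let parts := ((PySem.Str.split? selection ",").getD []).map PySem.Str.strip
  match psLoopA max_index parts PySem.Set.empty with
  | none => none
  | some s => if s = [] then none else some (PySem.List.sorted s (fun x => x))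

-- ===== PORT B =====
-- _parse_part: one non-empty part -> (start, end) interval, none if malformed
-- ("-" in part guarantees split("-", 1) has two pieces, hence the [a, b] match)
def pbParsePart (part : String) : Option (Int × Int) :=
  if PySem.Str.isIn "-" part then
    match PySem.Str.splitMax? part "-" 1 with
    | some [a, b] =>
      if PySem.Str.strIsdigit a && PySem.Str.strIsdigit b then
        some ((PySem.Int.ofStr? a).getD 0, (PySem.Int.ofStr? b).getD 0)
      else none
    | _ => none
  else if PySem.Str.strIsdigit part then
    some ((PySem.Int.ofStr? part).getD 0, (PySem.Int.ofStr? part).getD 0)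
  else none

-- the generator `s < 1 or e > max_index or s > e`
def pbBad (mi : Int) (iv : Int × Int) : Bool :=
  iv.1 < 1 || mi < iv.2 || iv.2 < iv.1

-- the merge loop: `cur` is merged[-1], closed intervals are emitted in order
def pbMerge : List (Int × Int) → Int × Int → List (Int × Int)
  | [], cur => [cur]
  | (s, e) :: rest, cur =>
    if s ≤ cur.2 + 1 then pbMerge rest (cur.1, if e > cur.2 then e else cur.2)
    else cur :: pbMerge rest (s, e)

-- out.extend(range(s, e+1)) over the merged intervals
def pbExpand (ivs : List (Int × Int)) : List Int :=
  ivs.foldl (fun acc p => acc ++ PySem.List.pyRange p.1 (p.2 + 1)) []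

def parse_severity_selection_alt (selection : String) (max_index : Int) : Option (List Int) :=
  let raw := ((((PySem.Str.split? selection ",").getD []).map PySem.Str.strip).filter
      (fun p => p ≠ "")).map pbParsePart
  if (none : Option (Int × Int)) ∈ raw then none
  else if (raw.filterMap id).any (pbBad max_index) then none
  else if raw = [] then none
  else
    -- after the None-check every element is a pair: filterMap id unpacks them
    match PySem.List.sorted (raw.filterMap id) (fun iv => iv.1) with
    | [] => none
    | c :: rest => some (pbExpand (pbMerge rest c))

-- ===== PRECONDITION & SPEC =====
def Spec_parse_severity_selection (selection : String) (max_index : Int) (out : Option (List Int)) : Prop := out = parse_severity_selection_alt selection max_index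
instance (selection : String) (max_index : Int) (out : Option (List Int)) : Decidable (Spec_parse_severity_selection selection max_index out) := by unfold Spec_parse_severity_selection; infer_instance

-- ===== CLAIM (what is proved, stated in full; the proofs are below) =====
def Claim_equal_parse_severity_selection : Prop := ∀ (selection : String) (max_index : Int), Dom_parse_severity_selection selection max_index → Spec_parse_severity_selection selection max_index (parse_severity_selection selection max_index)

-- ===== LEMMAS AND PROOFS =====

-- B's parse/validate stages on a list of parts, bundled for the induction
def pvBT (mi : Int) (parts : List String) : Option (List (Int × Int)) :=
  if ((parts.filter (fun p => p ≠ "")).map pbParsePart).any (fun o => o.isNone) then none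
  else if ((((parts.filter (fun p => p ≠ "")).map pbParsePart)).filterMap id).any (pbBad mi) then none
  else some (((parts.filter (fun p => p ≠ "")).map pbParsePart).filterMap id)

theorem pvBT_cons_skip (mi : Int) (rest : List String) :
    pvBT mi ("" :: rest) = pvBT mi rest := by
  unfold pvBT
  rw [List.filter_cons_of_neg (by simp)]

theorem pvBT_cons_none (mi : Int) (p : String) (rest : List String) (hp : p ≠ "")
    (h : pbParsePart p = none) : pvBT mi (p :: rest) = none := by
  unfold pvBT
  rw [List.filter_cons_of_pos (by simp [hp]), List.map_cons, h]
  simp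

theorem pvBT_cons_bad (mi : Int) (p : String) (rest : List String) (hp : p ≠ "")
    (iv : Int × Int) (h : pbParsePart p = some iv) (hb : pbBad mi iv = true) :
    pvBT mi (p :: rest) = none := by
  unfold pvBT
  rw [List.filter_cons_of_pos (by simp [hp]), List.map_cons, h]
  by_cases hn : ((rest.filter (fun p => p ≠ "")).map pbParsePart).any (fun o => o.isNone) = true
  · simp at hn
    simp [hn]
  · simp at hn
    simp [hb]

theorem pvBT_cons_good (mi : Int) (p : String) (rest : List String) (hp : p ≠ "")
    (iv : Int × Int) (h : pbParsePart p = some iv) (hb : pbBad mi iv = false) :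
    pvBT mi (p :: rest) = (pvBT mi rest).map (fun ivs => iv :: ivs) := by
  unfold pvBT
  rw [List.filter_cons_of_pos (by simp [hp]), List.map_cons, h]
  by_cases hn : ((rest.filter (fun p => p ≠ "")).map pbParsePart).any (fun o => o.isNone) = true
  · simp at hn
    simp [hn]
  · by_cases ha : ((((rest.filter (fun p => p ≠ "")).map pbParsePart)).filterMap id).any (pbBad mi) = true
    · simp at hn ha
      have hn' : ¬ ∃ x ∈ rest, ¬x = "" ∧ pbParsePart x = none := by
        rintro ⟨x, hx, hxe, hxn⟩; exact hn x hx hxe hxn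
      simp [hn', ha, hb]
    · simp at hn ha
      have hn' : ¬ ∃ x ∈ rest, ¬x = "" ∧ pbParsePart x = none := by
        rintro ⟨x, hx, hxe, hxn⟩; exact hn x hx hxe hxn
      simp [hn', hb, apply_ite (Option.map (fun ivs => iv :: ivs))]

-- B's port, re-expressed through pvBT (the three staged checks)
theorem pvAlt_eq (selection : String) (max_index : Int) :
    parse_severity_selection_alt selection max_index =
      match pvBT max_index (((PySem.Str.split? selection ",").getD []).map PySem.Str.strip) with
      | none => none
      | some ivs =>
        if ivs = [] then none
        else
          match PySem.List.sorted ivs (fun iv => iv.1) with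
          | [] => none
          | c :: rest => some (pbExpand (pbMerge rest c)) := by
  unfold parse_severity_selection_alt pvBT
  set raw := (((((PySem.Str.split? selection ",").getD []).map PySem.Str.strip)).filter
      (fun p => p ≠ "")).map pbParsePart with hraw
  show (if (none : Option (Int × Int)) ∈ raw then none
        else if (raw.filterMap id).any (pbBad max_index) then none
        else if raw = [] then none
        else match PySem.List.sorted (raw.filterMap id) (fun iv => iv.1) with
             | [] => none
             | c :: rest => some (pbExpand (pbMerge rest c))) =
       (match (if raw.any (fun o => o.isNone) then none
               else if (raw.filterMap id).any (pbBad max_index) then none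
               else some (raw.filterMap id) : Option (List (Int × Int))) with
        | none => none
        | some ivs =>
          if ivs = [] then none
          else match PySem.List.sorted ivs (fun iv => iv.1) with
               | [] => none
               | c :: rest => some (pbExpand (pbMerge rest c)))
  by_cases hn : (none : Option (Int × Int)) ∈ raw
  · rw [if_pos hn, if_pos (List.any_eq_true.mpr ⟨none, hn, rfl⟩)]
  · have hany : ¬ ((raw.any (fun o => o.isNone)) = true) := by
      intro hcon
      rcases List.any_eq_true.mp hcon with ⟨o, ho, hno⟩
      cases o with
      | none => exact hn ho
      | some v => simp at hno
    rw [if_neg hn, if_neg hany]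
    by_cases ha : ((raw.filterMap id).any (pbBad max_index)) = true
    · rw [if_pos ha]
      rw [if_pos ha]
    · rw [if_neg ha]
      rw [if_neg ha]
      show _ = if (raw.filterMap id) = [] then none
               else match PySem.List.sorted (raw.filterMap id) (fun iv => iv.1) with
                    | [] => none
                    | c :: rest => some (pbExpand (pbMerge rest c))
      by_cases he : raw = []
      · rw [if_pos he, if_pos (by rw [he]; rfl)]
      · have he2 : raw.filterMap id ≠ [] := by
          rcases hraww : raw with _ | ⟨o, raw'⟩
          · exact absurd hraww he
          · rcases o with _ | v
            · exact absurd (by rw [hraww]; exact List.mem_cons_self ..) hn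
            · simp
        rw [if_neg he, if_neg he2]

-- relation between A's set and B's interval list
def pvRel (S : List Int) (I : List (Int × Int)) : Prop :=
  S.Nodup ∧ (∀ p ∈ I, p.1 ≤ p.2) ∧ ∀ x : Int, x ∈ S ↔ ∃ p ∈ I, p.1 ≤ x ∧ x ≤ p.2

theorem pvNodup_update (S : PySem.Set Int) (xs : List Int) (h : S.Nodup) :
    (PySem.Set.update S xs).Nodup := by
  induction xs generalizing S with
  | nil => simpa [PySem.Set.update] using h
  | cons x xs ih =>
    simp only [PySem.Set.update, List.foldl_cons] at *
    exact ih _ (PySem.Set.nodup_add _ _ h)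

theorem pvRel_add (S : PySem.Set Int) (I : List (Int × Int)) (n : Int) (h : pvRel S I) :
    pvRel (PySem.Set.add S n) (I ++ [(n, n)]) := by
  obtain ⟨h1, h2, h3⟩ := h
  refine ⟨PySem.Set.nodup_add _ _ h1, ?_, ?_⟩
  · intro p hp
    rcases List.mem_append.mp hp with hp | hp
    · exact h2 p hp
    · simp at hp; simp [hp]
  · intro x
    rw [PySem.Set.mem_add, h3]
    constructor
    · rintro (⟨p, hp, hx⟩ | hx2)
      · exact ⟨p, List.mem_append.mpr (Or.inl hp), hx⟩
      · exact ⟨(n, n), List.mem_append.mpr (Or.inr (by simp)), by omega, by omega⟩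
    · rintro ⟨p, hp, hx⟩
      rcases List.mem_append.mp hp with hp | hp
      · exact Or.inl ⟨p, hp, hx⟩
      · simp at hp; subst hp; simp at hx ⊢; omega

theorem pvRel_update (S : PySem.Set Int) (I : List (Int × Int)) (a b : Int)
    (hab : a ≤ b) (h : pvRel S I) :
    pvRel (PySem.Set.update S (PySem.List.pyRange a (b + 1))) (I ++ [(a, b)]) := by
  obtain ⟨h1, h2, h3⟩ := h
  refine ⟨pvNodup_update _ _ h1, ?_, ?_⟩
  · intro p hp
    rcases List.mem_append.mp hp with hp | hp
    · exact h2 p hp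
    · simp at hp; simp [hp, hab]
  · intro x
    rw [PySem.Set.mem_update, h3, PySem.List.mem_pyRange_one]
    constructor
    · rintro (⟨p, hp, hx⟩ | hx)
      · exact ⟨p, List.mem_append.mpr (Or.inl hp), hx⟩
      · exact ⟨(a, b), List.mem_append.mpr (Or.inr (by simp)), by omega, by omega⟩
    · rintro ⟨p, hp, hx⟩
      rcases List.mem_append.mp hp with hp | hp
      · exact Or.inl ⟨p, hp, hx⟩
      · simp at hp; subst hp; simp at hx ⊢; omega

-- the induction: A's loop and B's staged pipeline agree part by part
theorem pvLoop_rel (mi : Int) (parts : List String) :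
    ∀ S I, pvRel S I →
      (psLoopA mi parts S = none ∧ pvBT mi parts = none) ∨
      (∃ S' ivs, psLoopA mi parts S = some S' ∧ pvBT mi parts = some ivs ∧ pvRel S' (I ++ ivs)) := by
  induction parts with
  | nil => exact fun S I h => Or.inr ⟨S, [], rfl, by simp [pvBT], by simpa⟩
  | cons p rest ih =>
    intro S I hrel
    simp only [psLoopA]
    by_cases hp : p = ""
    · subst hp
      rw [pvBT_cons_skip]
      simp only [reduceIte]
      exact ih S I hrel
    · simp only [if_neg hp]
      by_cases hd : PySem.Str.isIn "-" p = true
      · simp only [if_pos hd]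
        rcases hsp : PySem.Str.splitMax? p "-" 1 with _ | rps
        · left
          exact ⟨by trivial, pvBT_cons_none mi p rest hp (by unfold pbParsePart; rw [if_pos hd, hsp])⟩
        · match rps with
          | [] => left
                  exact ⟨by trivial, pvBT_cons_none mi p rest hp (by unfold pbParsePart; rw [if_pos hd, hsp])⟩
          | [a] => left
                   exact ⟨by trivial, pvBT_cons_none mi p rest hp (by unfold pbParsePart; rw [if_pos hd, hsp])⟩
          | a :: b :: c :: tl =>
            left
            exact ⟨by trivial, pvBT_cons_none mi p rest hp (by unfold pbParsePart; rw [if_pos hd, hsp])⟩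
          | [a, b] =>
            simp only []
            by_cases hdig : (!PySem.Str.strIsdigit a || !PySem.Str.strIsdigit b) = true
            · simp only [if_pos hdig]
              left
              refine ⟨by trivial, pvBT_cons_none mi p rest hp ?_⟩
              unfold pbParsePart
              rw [if_pos hd, hsp]
              dsimp only
              simp only [Bool.or_eq_true, Bool.not_eq_eq_eq_not, Bool.not_true] at hdig
              rcases hdig with hdig | hdig <;> rw [hdig] <;> simp
            · simp only [if_neg hdig]
              have hda : PySem.Str.strIsdigit a = true := by
                cases hcase : PySem.Str.strIsdigit a
                · exact absurd (by rw [hcase]; rfl) hdig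
                · rfl
              have hdb : PySem.Str.strIsdigit b = true := by
                cases hcase : PySem.Str.strIsdigit b
                · exact absurd (by rw [hcase]; simp) hdig
                · rfl
              have hpp : pbParsePart p =
                  some ((PySem.Int.ofStr? a).getD 0, (PySem.Int.ofStr? b).getD 0) := by
                unfold pbParsePart
                rw [if_pos hd, hsp]
                dsimp only
                rw [hda, hdb]
                simp
              by_cases hbound : (PySem.Int.ofStr? a).getD 0 < 1 ∨ (PySem.Int.ofStr? b).getD 0 > mi ∨
                  (PySem.Int.ofStr? a).getD 0 > (PySem.Int.ofStr? b).getD 0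
              · simp only [if_pos hbound]
                left
                exact ⟨by trivial, pvBT_cons_bad mi p rest hp _ hpp (by simp [pbBad]; omega)⟩
              · simp only [if_neg hbound]
                rw [pvBT_cons_good mi p rest hp _ hpp (by simp [pbBad]; omega)]
                rcases ih _ (I ++ [((PySem.Int.ofStr? a).getD 0, (PySem.Int.ofStr? b).getD 0)])
                    (pvRel_update S I _ _ (by omega) hrel) with ⟨hA, hB⟩ | ⟨S', ivs, hA, hB, hr⟩
                · left; exact ⟨hA, by rw [hB]; rfl⟩
                · right
                  refine ⟨S', _ :: ivs, hA, by rw [hB]; rfl, ?_⟩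
                  simpa [List.append_assoc] using hr
      · simp only [if_neg hd]
        by_cases hdig : (!PySem.Str.strIsdigit p) = true
        · simp only [if_pos hdig]
          left
          refine ⟨by trivial, pvBT_cons_none mi p rest hp ?_⟩
          simp only [Bool.not_eq_eq_eq_not, Bool.not_true] at hdig
          unfold pbParsePart
          rw [if_neg hd, if_neg (by rw [hdig]; exact Bool.false_ne_true)]
        · simp only [if_neg hdig]
          have hdig' : PySem.Str.strIsdigit p = true := by
            cases hcase : PySem.Str.strIsdigit p
            · exact absurd (by rw [hcase]; rfl) hdig
            · rfl
          have hpp : pbParsePart p =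
              some ((PySem.Int.ofStr? p).getD 0, (PySem.Int.ofStr? p).getD 0) := by
            unfold pbParsePart
            rw [if_neg hd, if_pos hdig']
          by_cases hbound : (PySem.Int.ofStr? p).getD 0 < 1 ∨ (PySem.Int.ofStr? p).getD 0 > mi
          · simp only [if_pos hbound]
            left
            exact ⟨by trivial, pvBT_cons_bad mi p rest hp _ hpp (by simp [pbBad]; omega)⟩
          · simp only [if_neg hbound]
            rw [pvBT_cons_good mi p rest hp _ hpp (by simp [pbBad]; omega)]
            rcases ih _ (I ++ [((PySem.Int.ofStr? p).getD 0, (PySem.Int.ofStr? p).getD 0)])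
                (pvRel_add S I _ hrel) with ⟨hA, hB⟩ | ⟨S', ivs, hA, hB, hr⟩
            · left; exact ⟨hA, by rw [hB]; rfl⟩
            · right
              refine ⟨S', _ :: ivs, hA, by rw [hB]; rfl, ?_⟩
              simpa [List.append_assoc] using hr

theorem pvPyRange_nil (a b : Int) (h : b ≤ a) : PySem.List.pyRange a b = [] := by
  refine List.eq_nil_iff_forall_not_mem.mpr fun x hx => ?_
  have := PySem.List.mem_pyRange_one.mp hx
  omega

theorem pvPairwise_pyRange (a b : Int) : (PySem.List.pyRange a b).Pairwise (· < ·) := by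
  have H : ∀ n : Nat, ∀ a : Int, b - a ≤ (n : Int) → (PySem.List.pyRange a b).Pairwise (· < ·) := by
    intro n
    induction n with
    | zero => intro a ha; simp [pvPyRange_nil a b (by omega)]
    | succ n ihn =>
      intro a ha
      by_cases h : b ≤ a
      · simp [pvPyRange_nil a b h]
      · rw [PySem.List.pyRange_one_cons (by omega)]
        refine List.Pairwise.cons (fun x hx => ?_) (ihn (a + 1) (by push_cast at ha ⊢; omega))
        have := PySem.List.mem_pyRange_one.mp hx
        omega
  exact H (b - a).toNat a (by omega)

theorem pvExpand_eq (ivs : List (Int × Int)) :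
    pbExpand ivs = ivs.flatMap (fun p => PySem.List.pyRange p.1 (p.2 + 1)) := by
  unfold pbExpand
  simpa using PySem.List.foldl_append_eq_flatMap (fun p : Int × Int => PySem.List.pyRange p.1 (p.2 + 1)) ivs []

theorem pvMerge_mem (l : List (Int × Int)) :
    ∀ cur : Int × Int, cur.1 ≤ cur.2 → (∀ p ∈ l, p.1 ≤ p.2) → (∀ p ∈ l, cur.1 ≤ p.1) →
      l.Pairwise (fun p q => p.1 ≤ q.1) →
      ∀ x : Int, x ∈ pbExpand (pbMerge l cur) ↔
        (cur.1 ≤ x ∧ x ≤ cur.2) ∨ ∃ p ∈ l, p.1 ≤ x ∧ x ≤ p.2 := by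
  induction l with
  | nil =>
    intro cur hcur _ _ _ x
    simp [pbMerge, pvExpand_eq, PySem.List.mem_pyRange_one]
  | cons q rest ih =>
    obtain ⟨s, e⟩ := q
    intro cur hcur hall hfst hpw x
    have hse : s ≤ e := hall (s, e) (by simp)
    have hcs : cur.1 ≤ s := hfst (s, e) (by simp)
    have hall' : ∀ p ∈ rest, p.1 ≤ p.2 := fun p hp => hall p (by simp [hp])
    have hfst' : ∀ p ∈ rest, s ≤ p.1 := fun p hp => (List.pairwise_cons.mp hpw).1 p hp
    have hpw' := (List.pairwise_cons.mp hpw).2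
    by_cases hov : s ≤ cur.2 + 1
    · simp only [pbMerge, if_pos hov]
      set M := if e > cur.2 then e else cur.2 with hM
      have hub : e ≤ M ∧ cur.2 ≤ M ∧ (M = e ∨ M = cur.2) := by
        rw [hM]; split <;> omega
      rw [ih (cur.1, M) (by dsimp; omega) hall' (fun p hp => le_trans hcs (hfst' p hp)) hpw']
      constructor
      · rintro (hx | ⟨p, hp, hxp⟩)
        · dsimp at hx
          by_cases hxc : x ≤ cur.2
          · exact Or.inl ⟨hx.1, hxc⟩
          · exact Or.inr ⟨(s, e), by simp, by omega, by omega⟩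
        · exact Or.inr ⟨p, by simp [hp], hxp⟩
      · rintro (hx | ⟨p, hp, hxp⟩)
        · exact Or.inl ⟨hx.1, by dsimp; omega⟩
        · rcases List.mem_cons.mp hp with rfl | hp'
          · exact Or.inl ⟨by dsimp; omega, by dsimp; omega⟩
          · exact Or.inr ⟨p, hp', hxp⟩
    · simp only [pbMerge, if_neg hov]
      rw [pvExpand_eq, List.flatMap_cons, ← pvExpand_eq]
      rw [List.mem_append]
      rw [ih (s, e) hse hall' hfst' hpw']
      rw [PySem.List.mem_pyRange_one]
      constructor
      · rintro (hx | hx | ⟨p, hp, hxp⟩)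
        · exact Or.inl (by omega)
        · exact Or.inr ⟨(s, e), by simp, hx⟩
        · exact Or.inr ⟨p, by simp [hp], hxp⟩
      · rintro (hx | ⟨p, hp, hxp⟩)
        · exact Or.inl (by omega)
        · rcases List.mem_cons.mp hp with rfl | hp'
          · exact Or.inr (Or.inl hxp)
          · exact Or.inr (Or.inr ⟨p, hp', hxp⟩)

theorem pvMerge_pairwise (l : List (Int × Int)) :
    ∀ cur : Int × Int, cur.1 ≤ cur.2 → (∀ p ∈ l, p.1 ≤ p.2) → (∀ p ∈ l, cur.1 ≤ p.1) →
      l.Pairwise (fun p q => p.1 ≤ q.1) →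
      (pbExpand (pbMerge l cur)).Pairwise (· < ·) ∧
      ∀ x ∈ pbExpand (pbMerge l cur), cur.1 ≤ x := by
  induction l with
  | nil =>
    intro cur hcur _ _ _
    constructor
    · simpa [pbMerge, pvExpand_eq] using pvPairwise_pyRange cur.1 (cur.2 + 1)
    · intro x hx
      simp [pbMerge, pvExpand_eq, PySem.List.mem_pyRange_one] at hx
      omega
  | cons q rest ih =>
    obtain ⟨s, e⟩ := q
    intro cur hcur hall hfst hpw
    have hse : s ≤ e := hall (s, e) (by simp)
    have hcs : cur.1 ≤ s := hfst (s, e) (by simp)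
    have hall' : ∀ p ∈ rest, p.1 ≤ p.2 := fun p hp => hall p (by simp [hp])
    have hfst' : ∀ p ∈ rest, s ≤ p.1 := fun p hp => (List.pairwise_cons.mp hpw).1 p hp
    have hpw' := (List.pairwise_cons.mp hpw).2
    by_cases hov : s ≤ cur.2 + 1
    · simp only [pbMerge, if_pos hov]
      exact ih (cur.1, if e > cur.2 then e else cur.2) (by dsimp; split <;> omega) hall'
        (fun p hp => le_trans hcs (hfst' p hp)) hpw'
    · simp only [pbMerge, if_neg hov]
      obtain ⟨htailpw, htailge⟩ := ih (s, e) hse hall' hfst' hpw'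
      rw [pvExpand_eq, List.flatMap_cons, ← pvExpand_eq]
      constructor
      · rw [List.pairwise_append]
        refine ⟨pvPairwise_pyRange cur.1 (cur.2 + 1), htailpw, fun a ha b hb => ?_⟩
        have ha' := PySem.List.mem_pyRange_one.mp ha
        have hb' := htailge b hb
        dsimp at hb'
        omega
      · intro x hx
        rcases List.mem_append.mp hx with hx | hx
        · have := PySem.List.mem_pyRange_one.mp hx; omega
        · have := htailge x hx; dsimp at this; omega

theorem pvFinal (S : List Int) (I : List (Int × Int)) (h : pvRel S I) (c : Int × Int)
    (rest : List (Int × Int)) (hs : PySem.List.sorted I (fun iv => iv.1) = c :: rest) :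
    PySem.List.sorted S (fun x => x) = pbExpand (pbMerge rest c) := by
  obtain ⟨hnd, hval, hmem⟩ := h
  have hperm : (c :: rest).Perm I := by
    have := PySem.List.sorted_perm I (fun iv => iv.1) false
    rwa [hs] at this
  have hpw : (c :: rest).Pairwise (fun p q : Int × Int => p.1 ≤ q.1) := by
    have := PySem.List.sorted_pairwise I (fun iv => iv.1)
    rwa [hs] at this
  have hvalc : ∀ p ∈ c :: rest, p.1 ≤ p.2 := fun p hp => hval p (hperm.subset hp)
  have hcur : c.1 ≤ c.2 := hvalc c (by simp)
  have hall' : ∀ p ∈ rest, p.1 ≤ p.2 := fun p hp => hvalc p (by simp [hp])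
  have hfst' : ∀ p ∈ rest, c.1 ≤ p.1 := fun p hp => (List.pairwise_cons.mp hpw).1 p hp
  have hpw' := (List.pairwise_cons.mp hpw).2
  have hEmem := pvMerge_mem rest c hcur hall' hfst' hpw'
  obtain ⟨hEpw, _⟩ := pvMerge_pairwise rest c hcur hall' hfst' hpw'
  have hEnd : (pbExpand (pbMerge rest c)).Nodup := hEpw.imp (fun h => ne_of_lt h)
  have hP : (pbExpand (pbMerge rest c)).Perm S := by
    rw [List.perm_ext_iff_of_nodup hEnd hnd]
    intro x
    rw [hEmem x, hmem x]
    constructor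
    · rintro (hx | ⟨p, hp, hxp⟩)
      · exact ⟨c, hperm.subset (by simp), hx⟩
      · exact ⟨p, hperm.subset (by simp [hp]), hxp⟩
    · rintro ⟨p, hp, hxp⟩
      rcases List.mem_cons.mp (hperm.mem_iff.mpr hp) with rfl | hp'
      · exact Or.inl hxp
      · exact Or.inr ⟨p, hp', hxp⟩
  exact PySem.List.sorted_eq_of_perm_of_pairwise_lt S (pbExpand (pbMerge rest c)) (fun x => x) hP hEpw

theorem pvEmptyIff (S : List Int) (I : List (Int × Int)) (h : pvRel S I) :
    S = [] ↔ I = [] := by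
  obtain ⟨_, hval, hmem⟩ := h
  constructor
  · intro hS
    rcases hI : I with _ | ⟨p, I'⟩
    · rfl
    · have hx : p.1 ∈ S := (hmem p.1).mpr ⟨p, by simp [hI], le_refl _, hval p (by simp [hI])⟩
      rw [hS] at hx
      simp at hx
  · intro hI
    subst hI
    refine List.eq_nil_iff_forall_not_mem.mpr fun x hx => ?_
    rcases (hmem x).mp hx with ⟨p, hp, _⟩
    simp at hp

-- ===== VERDICT (by name: the statement is the Claim_ definition above) =====
theorem parse_severity_selection_spec : Claim_equal_parse_severity_selection := by
  intro selection max_index _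
  unfold Spec_parse_severity_selection
  rw [pvAlt_eq]
  unfold parse_severity_selection
  show (match psLoopA max_index (((PySem.Str.split? selection ",").getD []).map PySem.Str.strip)
        PySem.Set.empty with
      | none => none
      | some s => if s = [] then none else some (PySem.List.sorted s (fun x => x))) = _
  have h0 : pvRel ([] : PySem.Set Int) [] := ⟨List.nodup_nil, by simp, by simp⟩
  rcases pvLoop_rel max_index (((PySem.Str.split? selection ",").getD []).map PySem.Str.strip)
      ([] : PySem.Set Int) [] h0 with ⟨hA, hB⟩ | ⟨S', ivs, hA, hB, hrel⟩
  · rw [show psLoopA max_index (((PySem.Str.split? selection ",").getD []).map PySem.Str.strip)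
        PySem.Set.empty = none from hA, hB]
  · rw [show psLoopA max_index (((PySem.Str.split? selection ",").getD []).map PySem.Str.strip)
        PySem.Set.empty = some S' from hA, hB]
    simp only [List.nil_append] at hrel
    by_cases hSe : S' = []
    · have hIe : ivs = [] := (pvEmptyIff _ _ hrel).mp hSe
      simp [hSe, hIe]
    · have hIe : ivs ≠ [] := fun h => hSe ((pvEmptyIff _ _ hrel).mpr h)
      rcases hs : PySem.List.sorted ivs (fun iv => iv.1) with _ | ⟨c, rest⟩
      · exact absurd ((PySem.List.sorted_eq_nil_iff
          (xs := ivs) (key := fun iv => iv.1) (rev := false)).mp hs) hIe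
      · simp [hSe, hIe, hs, pvFinal S' ivs hrel c rest hs]
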